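-- pv_equiv track=rewrite | github.com/GreyOakcapital/Greyoak-Score-raw-data | backend/predictor/rule_based.py | get_sector_group
-- ===== SOURCE A (Python) =====
-- def get_sector_group(ticker: str) -> str:
--     """
--     Get sector group for a ticker
--
--     Args:
--         ticker: Stock ticker
--
--     Returns:
--         Sector group string
--     """
--     ticker_upper = ticker.upper()
--
--     # Simplified sector mapping
--     if any(x in ticker_upper for x in ['RELIANCE', 'ONGC', 'BPCL', 'HPCL', 'IOC']):
--         return 'energy'
--     elif any(x in ticker_upper for x in ['TCS', 'INFY', 'WIPRO', 'HCLTECH', 'TECHM']):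
--         return 'it'
--     elif any(x in ticker_upper for x in ['HDFCBANK', 'ICICIBANK', 'KOTAKBANK', 'AXISBANK', 'INDUSINDBK']):
--         return 'banks'
--     elif any(x in ticker_upper for x in ['HINDUNILVR', 'NESTLEIND', 'BRITANNIA', 'ITC', 'DABUR']):
--         return 'fmcg'
--     elif any(x in ticker_upper for x in ['SUNPHARMA', 'DRREDDY', 'CIPLA', 'LUPIN', 'DIVISLAB']):
--         return 'pharma'
--     elif any(x in ticker_upper for x in ['TATASTEEL', 'JSWSTEEL', 'HINDALCO', 'VEDL', 'JINDALSTEL']):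
--         return 'metals'
--     elif any(x in ticker_upper for x in ['MARUTI', 'M&M', 'TATAMOTORS', 'BAJAJ-AUTO', 'HEROMOTOCO']):
--         return 'auto_caps'
--     elif any(x in ticker_upper for x in ['SBIN', 'PNB', 'BANKBARODA', 'CANBK']):
--         return 'psu_banks'
--     else:
--         return 'diversified'
-- ===== SOURCE B (Python) =====
-- _LABELS = ('energy', 'it', 'banks', 'fmcg', 'pharma', 'metals', 'auto_caps', 'psu_banks')
--
-- # keyword -> priority (index of its group in A's if-elif chain)
-- _KEYWORD_PRIORITY = {
--     'RELIANCE': 0, 'ONGC': 0, 'BPCL': 0, 'HPCL': 0, 'IOC': 0,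
--     'TCS': 1, 'INFY': 1, 'WIPRO': 1, 'HCLTECH': 1, 'TECHM': 1,
--     'HDFCBANK': 2, 'ICICIBANK': 2, 'KOTAKBANK': 2, 'AXISBANK': 2, 'INDUSINDBK': 2,
--     'HINDUNILVR': 3, 'NESTLEIND': 3, 'BRITANNIA': 3, 'ITC': 3, 'DABUR': 3,
--     'SUNPHARMA': 4, 'DRREDDY': 4, 'CIPLA': 4, 'LUPIN': 4, 'DIVISLAB': 4,
--     'TATASTEEL': 5, 'JSWSTEEL': 5, 'HINDALCO': 5, 'VEDL': 5, 'JINDALSTEL': 5,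
--     'MARUTI': 6, 'M&M': 6, 'TATAMOTORS': 6, 'BAJAJ-AUTO': 6, 'HEROMOTOCO': 6,
--     'SBIN': 7, 'PNB': 7, 'BANKBARODA': 7, 'CANBK': 7,
-- }
--
-- _LENGTHS = (3, 4, 5, 6, 7, 8, 9, 10)  # the distinct keyword lengths
--
--
-- def get_sector_group(ticker: str) -> str:
--     # Multi-pattern text scan: slide over the uppercased ticker, hash-look-up every
--     # candidate substring of a keyword length, and keep the minimal group priority.
--     u = ticker.upper()
--     best = 8
--     for i in range(len(u)):
--         for length in _LENGTHS:
--             j = _KEYWORD_PRIORITY.get(u[i:i + length])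
--             if j is not None and j < best:
--                 best = j
--     return _LABELS[best] if best < 8 else 'diversified'
-- ===== Notes on version B (the rewrite author's own statement) =====
-- stated objective: alternative
-- what changed: Replaces A's per-keyword substring tests in a nine-branch if-elif chain by a sliding text scan: every substring of the uppercased ticker whose length is a keyword length is looked up in a keyword-to-priority hash map and the minimal matched priority selects the label.
import Mathlib
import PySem

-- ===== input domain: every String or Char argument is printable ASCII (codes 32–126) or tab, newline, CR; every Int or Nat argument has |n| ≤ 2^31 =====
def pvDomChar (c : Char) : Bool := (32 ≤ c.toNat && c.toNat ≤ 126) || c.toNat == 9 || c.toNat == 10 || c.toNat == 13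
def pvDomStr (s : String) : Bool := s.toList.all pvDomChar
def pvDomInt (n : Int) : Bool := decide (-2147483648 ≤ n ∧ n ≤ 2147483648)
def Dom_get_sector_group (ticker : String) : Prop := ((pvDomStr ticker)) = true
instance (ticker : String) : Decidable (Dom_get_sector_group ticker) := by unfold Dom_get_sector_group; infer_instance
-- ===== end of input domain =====

-- B replaces A's nine-branch per-keyword substring chain by a sliding text scan with a
-- keyword->priority hash map, keeping the minimal matched priority (alternative algorithm).

-- ===== PORT A =====
def get_sector_group (ticker : String) : String :=
  let ticker_upper := PySem.Str.upper ticker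
  if ["RELIANCE", "ONGC", "BPCL", "HPCL", "IOC"].any (fun x => PySem.Str.isIn x ticker_upper) then
    "energy"
  else if ["TCS", "INFY", "WIPRO", "HCLTECH", "TECHM"].any (fun x => PySem.Str.isIn x ticker_upper) then
    "it"
  else if ["HDFCBANK", "ICICIBANK", "KOTAKBANK", "AXISBANK", "INDUSINDBK"].any (fun x => PySem.Str.isIn x ticker_upper) then
    "banks"
  else if ["HINDUNILVR", "NESTLEIND", "BRITANNIA", "ITC", "DABUR"].any (fun x => PySem.Str.isIn x ticker_upper) then
    "fmcg"
  else if ["SUNPHARMA", "DRREDDY", "CIPLA", "LUPIN", "DIVISLAB"].any (fun x => PySem.Str.isIn x ticker_upper) then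
    "pharma"
  else if ["TATASTEEL", "JSWSTEEL", "HINDALCO", "VEDL", "JINDALSTEL"].any (fun x => PySem.Str.isIn x ticker_upper) then
    "metals"
  else if ["MARUTI", "M&M", "TATAMOTORS", "BAJAJ-AUTO", "HEROMOTOCO"].any (fun x => PySem.Str.isIn x ticker_upper) then
    "auto_caps"
  else if ["SBIN", "PNB", "BANKBARODA", "CANBK"].any (fun x => PySem.Str.isIn x ticker_upper) then
    "psu_banks"
  else
    "diversified"

-- ===== PORT B =====
def pvLabels : List String :=
  ["energy", "it", "banks", "fmcg", "pharma", "metals", "auto_caps", "psu_banks"]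

-- keyword -> priority (_KEYWORD_PRIORITY in Source B)
def pvKwPairs : List (String × Nat) :=
  [("RELIANCE", 0), ("ONGC", 0), ("BPCL", 0), ("HPCL", 0), ("IOC", 0),
   ("TCS", 1), ("INFY", 1), ("WIPRO", 1), ("HCLTECH", 1), ("TECHM", 1),
   ("HDFCBANK", 2), ("ICICIBANK", 2), ("KOTAKBANK", 2), ("AXISBANK", 2), ("INDUSINDBK", 2),
   ("HINDUNILVR", 3), ("NESTLEIND", 3), ("BRITANNIA", 3), ("ITC", 3), ("DABUR", 3),
   ("SUNPHARMA", 4), ("DRREDDY", 4), ("CIPLA", 4), ("LUPIN", 4), ("DIVISLAB", 4),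
   ("TATASTEEL", 5), ("JSWSTEEL", 5), ("HINDALCO", 5), ("VEDL", 5), ("JINDALSTEL", 5),
   ("MARUTI", 6), ("M&M", 6), ("TATAMOTORS", 6), ("BAJAJ-AUTO", 6), ("HEROMOTOCO", 6),
   ("SBIN", 7), ("PNB", 7), ("BANKBARODA", 7), ("CANBK", 7)]

def pvKwDict : PySem.Dict String Nat := PySem.Dict.ofList pvKwPairs

def pvLens : List Nat := [3, 4, 5, 6, 7, 8, 9, 10]

-- the two nested loops of Source B: minimal matched priority over all positions, 8 = no match
def pvBest (u : String) : Nat :=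
  (PySem.List.pyRange 0 (PySem.Str.len u) 1).foldl (fun b i =>
    pvLens.foldl (fun b (L : Nat) =>
      match pvKwDict.get? (PySem.Str.slice u (some i) (some (i + (L : Int)))) with
      | some j => if j < b then j else b
      | none => b) b) 8

def get_sector_group_alt (ticker : String) : String :=
  let u := PySem.Str.upper ticker
  let best := pvBest u
  if best < 8 then pvLabels.getD best "diversified" else "diversified"

-- ===== PRECONDITION & SPEC =====
def Spec_get_sector_group (ticker : String) (out : String) : Prop := out = get_sector_group_alt ticker
instance (ticker : String) (out : String) : Decidable (Spec_get_sector_group ticker out) := by unfold Spec_get_sector_group; infer_instance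

-- ===== CLAIM (what is proved, stated in full; the proofs are below) =====
def Claim_equal_get_sector_group : Prop := ∀ (ticker : String), Dom_get_sector_group ticker → Spec_get_sector_group ticker (get_sector_group ticker)

-- ===== LEMMAS AND PROOFS =====

-- A's keyword groups, indexed by their position in the if-elif chain
def pvGroup : Nat → List String
  | 0 => ["RELIANCE", "ONGC", "BPCL", "HPCL", "IOC"]
  | 1 => ["TCS", "INFY", "WIPRO", "HCLTECH", "TECHM"]
  | 2 => ["HDFCBANK", "ICICIBANK", "KOTAKBANK", "AXISBANK", "INDUSINDBK"]
  | 3 => ["HINDUNILVR", "NESTLEIND", "BRITANNIA", "ITC", "DABUR"]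
  | 4 => ["SUNPHARMA", "DRREDDY", "CIPLA", "LUPIN", "DIVISLAB"]
  | 5 => ["TATASTEEL", "JSWSTEEL", "HINDALCO", "VEDL", "JINDALSTEL"]
  | 6 => ["MARUTI", "M&M", "TATAMOTORS", "BAJAJ-AUTO", "HEROMOTOCO"]
  | 7 => ["SBIN", "PNB", "BANKBARODA", "CANBK"]
  | _ => []

-- "group g has a keyword occurring in u" — A's g-th guard
def pvM (u : String) (g : Nat) : Bool := (pvGroup g).any (fun x => PySem.Str.isIn x u)

-- B's inner update, folded over an arbitrary candidate list
def pvStFold {β : Type} (g : β → Option Nat) (C : List β) (b : Nat) : Nat :=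
  C.foldl (fun b x => match g x with | some j => if j < b then j else b | none => b) b

theorem pvStFold_le {β : Type} (g : β → Option Nat) (C : List β) (b : Nat) :
    pvStFold g C b ≤ b := by
  induction C generalizing b with
  | nil => simp [pvStFold]
  | cons x C ih =>
    simp only [pvStFold, List.foldl_cons] at *
    refine le_trans (ih _) ?_
    cases hx : g x with
    | none => simp
    | some j => simp only; split <;> omega

theorem pvStFold_ub {β : Type} (g : β → Option Nat) (C : List β) (b : Nat) :
    ∀ x ∈ C, ∀ j, g x = some j → pvStFold g C b ≤ j := by
  induction C generalizing b with
  | nil => intro x hx; simp at hx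
  | cons y C ih =>
    intro x hx j hj
    simp only [pvStFold, List.foldl_cons]
    rcases List.mem_cons.mp hx with rfl | hx
    · refine le_trans (pvStFold_le _ _ _) ?_
      rw [hj]; simp only; split <;> omega
    · exact ih _ x hx j hj

theorem pvStFold_mem {β : Type} (g : β → Option Nat) (C : List β) (b : Nat) :
    pvStFold g C b = b ∨ ∃ x ∈ C, g x = some (pvStFold g C b) := by
  induction C generalizing b with
  | nil => left; simp [pvStFold]
  | cons y C ih =>
    have hstep : pvStFold g (y :: C) b
        = pvStFold g C (match g y with | some j => if j < b then j else b | none => b) := rfl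
    rcases ih (match g y with | some j => if j < b then j else b | none => b) with h | ⟨x, hx, hgx⟩
    · rw [hstep, h]
      cases hy : g y with
      | none => simp
      | some j =>
        simp only
        split
        · right; exact ⟨y, List.mem_cons_self .., by rw [hy]⟩
        · left; rfl
    · right; exact ⟨x, List.mem_cons_of_mem _ hx, by rw [hstep, ← hgx]⟩

theorem pvFoldl_flatMap {α β γ : Type} (l : List α) (f : α → List β) (st : γ → β → γ) (b : γ) :
    l.foldl (fun acc x => (f x).foldl st acc) b = (l.flatMap f).foldl st b := by
  induction l generalizing b with
  | nil => rfl
  | cons y l ih => simp [List.foldl_append, ih]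

-- B's candidate list and lookup function
def pvCand (u : String) : List (Int × Nat) :=
  (PySem.List.pyRange 0 (PySem.Str.len u) 1).flatMap (fun i => pvLens.map (fun L => (i, L)))

def pvLook (u : String) (p : Int × Nat) : Option Nat :=
  pvKwDict.get? (PySem.Str.slice u (some p.1) (some (p.1 + (p.2 : Int))))

theorem pvBest_eq (u : String) : pvBest u = pvStFold (pvLook u) (pvCand u) 8 := by
  unfold pvBest pvStFold pvCand pvLook
  rw [← pvFoldl_flatMap]
  simp only [List.foldl_map]

-- every keyword: dict value, length in pvLens, membership in its group; and back
set_option maxRecDepth 8192 in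
theorem pvKw_facts : ∀ p ∈ pvKwPairs,
    pvKwDict.get? p.1 = some p.2 ∧ p.1.toList.length ∈ pvLens ∧ 3 ≤ p.1.toList.length := by
  decide

set_option maxRecDepth 8192 in
theorem pvPairs_group : ∀ p ∈ pvKwPairs, p.1 ∈ pvGroup p.2 := by decide

set_option maxRecDepth 8192 in
theorem pvItems : pvKwDict.items = pvKwPairs := by decide

theorem pvGroup_pairs (g : Nat) : ∀ k ∈ pvGroup g, (k, g) ∈ pvKwPairs := by
  match g with
  | 0 | 1 | 2 | 3 | 4 | 5 | 6 | 7 => decide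
  | n + 8 => intro k hk; simp [pvGroup] at hk

-- forward: a matching group bounds B's best priority
theorem pvBest_le (u : String) (g : Nat) (h : pvM u g = true) : pvBest u ≤ g := by
  obtain ⟨k, hk, hin⟩ := List.any_eq_true.mp h
  have hpair := pvGroup_pairs g k hk
  obtain ⟨hget, hlen, h3⟩ := pvKw_facts _ hpair
  dsimp only at hget hlen h3
  obtain ⟨s, t, hst⟩ := (PySem.Str.isIn_iff_infix k u).mp hin
  -- the slice at position s.length of length |k| is exactly k
  have hslice : PySem.Str.slice u (some (s.length : Int))
      (some ((s.length : Int) + (k.toList.length : Int))) = k := by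
    apply String.toList_inj.mp
    rw [PySem.Str.toList_slice, PySem.Chars.slice_eq_listSlice,
        PySem.List.slice_natCast_add, ← hst]
    rw [List.append_assoc, List.drop_left, List.take_left]
  have hx : ((s.length : Int), k.toList.length) ∈ pvCand u := by
    refine List.mem_flatMap.mpr ⟨(s.length : Int), ?_, ?_⟩
    · refine PySem.List.mem_pyRange_one.mpr ⟨by positivity, ?_⟩
      rw [PySem.Str.len_eq, ← hst]
      simp only [List.length_append]
      have : 0 < k.toList.length := by omega
      push_cast; omega
    · exact List.mem_map.mpr ⟨k.toList.length, hlen, rfl⟩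
  have hg : pvLook u ((s.length : Int), k.toList.length) = some g := by
    unfold pvLook; simp only; rw [hslice, hget]
  rw [pvBest_eq]
  exact pvStFold_ub (pvLook u) (pvCand u) 8 _ hx g hg

-- backward: if B's best is a real priority, that group matches
theorem pvBest_M (u : String) (h : pvBest u < 8) : pvM u (pvBest u) = true := by
  rcases pvBest_eq u ▸ pvStFold_mem (pvLook u) (pvCand u) 8 with h8 | ⟨x, hx, hgx⟩
  · omega
  · obtain ⟨i, hi, hx'⟩ := List.mem_flatMap.mp hx
    obtain ⟨L, _, hpl⟩ := List.mem_map.mp hx'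
    cases hpl
    have hi0 : (0 : Int) ≤ i := (PySem.List.mem_pyRange_one.mp hi).1
    set w := PySem.Str.slice u (some i) (some (i + (L : Int))) with hw
    have hmem : (w, pvBest u) ∈ pvKwPairs := by
      rw [← pvItems]
      exact PySem.Dict.mem_items_of_get?_eq_some pvKwDict hgx
    have hinf : w.toList <:+: u.toList := by
      rw [hw, PySem.Str.toList_slice, PySem.Chars.slice_eq_listSlice,
          PySem.List.slice_toNat u.toList hi0 (by positivity)]
      exact (List.take_prefix _ _).isInfix.trans (List.drop_suffix _ _).isInfix
    exact List.any_eq_true.mpr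
      ⟨w, pvPairs_group _ hmem, (PySem.Str.isIn_iff_infix w u).mpr hinf⟩

theorem pvBest_le8 (u : String) : pvBest u ≤ 8 := by
  rw [pvBest_eq]; exact pvStFold_le _ _ _

-- the if-elif chain over pvM equals B's selection by minimal priority
theorem pvChain_eq (u : String) :
    (if pvM u 0 then "energy"
     else if pvM u 1 then "it"
     else if pvM u 2 then "banks"
     else if pvM u 3 then "fmcg"
     else if pvM u 4 then "pharma"
     else if pvM u 5 then "metals"
     else if pvM u 6 then "auto_caps"
     else if pvM u 7 then "psu_banks"
     else "diversified")
    = (if pvBest u < 8 then pvLabels.getD (pvBest u) "diversified" else "diversified") := by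
  have hle8 := pvBest_le8 u
  by_cases h0 : pvM u 0 = true
  · have := pvBest_le u 0 h0
    have hb : pvBest u = 0 := by omega
    simp [h0, hb, pvLabels]
  by_cases h1 : pvM u 1 = true
  · have := pvBest_le u 1 h1
    have hM := pvBest_M u (by omega)
    have hb : pvBest u = 1 := by interval_cases h : pvBest u <;> simp_all
    simp [h0, h1, hb, pvLabels]
  by_cases h2 : pvM u 2 = true
  · have := pvBest_le u 2 h2
    have hM := pvBest_M u (by omega)
    have hb : pvBest u = 2 := by interval_cases h : pvBest u <;> simp_all
    simp [h0, h1, h2, hb, pvLabels]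
  by_cases h3 : pvM u 3 = true
  · have := pvBest_le u 3 h3
    have hM := pvBest_M u (by omega)
    have hb : pvBest u = 3 := by interval_cases h : pvBest u <;> simp_all
    simp [h0, h1, h2, h3, hb, pvLabels]
  by_cases h4 : pvM u 4 = true
  · have := pvBest_le u 4 h4
    have hM := pvBest_M u (by omega)
    have hb : pvBest u = 4 := by interval_cases h : pvBest u <;> simp_all
    simp [h0, h1, h2, h3, h4, hb, pvLabels]
  by_cases h5 : pvM u 5 = true
  · have := pvBest_le u 5 h5
    have hM := pvBest_M u (by omega)
    have hb : pvBest u = 5 := by interval_cases h : pvBest u <;> simp_all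
    simp [h0, h1, h2, h3, h4, h5, hb, pvLabels]
  by_cases h6 : pvM u 6 = true
  · have := pvBest_le u 6 h6
    have hM := pvBest_M u (by omega)
    have hb : pvBest u = 6 := by interval_cases h : pvBest u <;> simp_all
    simp [h0, h1, h2, h3, h4, h5, h6, hb, pvLabels]
  by_cases h7 : pvM u 7 = true
  · have := pvBest_le u 7 h7
    have hM := pvBest_M u (by omega)
    have hb : pvBest u = 7 := by interval_cases h : pvBest u <;> simp_all
    simp [h0, h1, h2, h3, h4, h5, h6, h7, hb, pvLabels]
  · have hb : pvBest u = 8 := by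
      by_contra hne
      have hM := pvBest_M u (by omega)
      interval_cases h : pvBest u <;> simp_all
    simp [h0, h1, h2, h3, h4, h5, h6, h7, hb]

-- ===== VERDICT (by name: the statement is the Claim_ definition above) =====
theorem get_sector_group_spec : Claim_equal_get_sector_group := by
  intro ticker _
  unfold Spec_get_sector_group get_sector_group get_sector_group_alt
  exact pvChain_eq (PySem.Str.upper ticker)
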